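-- pv_equiv track=rewrite | github.com/tjluyao/iris_demo | src/partition.py | recover_cnts
-- ===== SOURCE A (Python) =====
-- def recover_cnts(keys, cnts, ids):
--     acc = []
--     for k in range(len(ids)):
--         cur = 0
--         for n in range(0 if k == 0 else ids[k - 1] + 1, ids[k] + 1):
--             cur += cnts[n]
--         acc += [cur]
--     return [keys[id] for id in ids], acc
-- ===== SOURCE B (Python) =====
-- def recover_cnts(keys, cnts, ids):
--     # one prefix-sum pass over cnts, then O(1) difference per segment
--     pref = [0]
--     for c in cnts:
--         pref.append(pref[-1] + c)
--     acc = []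
--     prev = 0
--     for i in ids:
--         acc.append(pref[i + 1] - pref[prev] if prev <= i else 0)
--         prev = i + 1
--     return [keys[i] for i in ids], acc
-- ===== Notes on version B (the rewrite author's own statement) =====
-- stated objective: faster
-- what changed: Replaces the nested re-summation loops with a single prefix-sum pass over cnts and an O(1) guarded difference per id.
-- outside the precondition, e.g. on recover_cnts([-2, 0], [-1, 10], [-2, -1]): A returns ([-2, 0], [0, 10]), B returns ([-2, 0], [0, -9])
import Mathlib
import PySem

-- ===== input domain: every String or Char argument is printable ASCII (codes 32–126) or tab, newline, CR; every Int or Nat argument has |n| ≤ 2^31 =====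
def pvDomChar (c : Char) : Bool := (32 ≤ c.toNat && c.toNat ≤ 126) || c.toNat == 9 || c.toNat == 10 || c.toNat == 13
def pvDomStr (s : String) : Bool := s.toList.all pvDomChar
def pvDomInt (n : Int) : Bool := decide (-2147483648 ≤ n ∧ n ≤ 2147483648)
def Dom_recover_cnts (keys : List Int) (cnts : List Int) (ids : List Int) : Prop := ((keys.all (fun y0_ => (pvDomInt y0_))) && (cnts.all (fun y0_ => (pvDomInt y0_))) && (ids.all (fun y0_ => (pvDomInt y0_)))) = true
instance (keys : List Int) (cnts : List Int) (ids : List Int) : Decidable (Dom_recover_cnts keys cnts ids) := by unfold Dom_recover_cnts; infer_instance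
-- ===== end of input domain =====

-- B replaces A's nested re-summation loops with one prefix-sum pass and an O(1) guarded difference per id (objective: faster).

-- ===== PORT A =====
def recover_cnts (keys : List Int) (cnts : List Int) (ids : List Int) : List Int × List Int :=
  let acc := (PySem.List.pyRange 0 (ids.length : Int)).foldl (fun acc k =>
    acc ++ [(PySem.List.pyRange (if k = 0 then 0 else PySem.List.pyGetD ids (k - 1) 0 + 1)
        (PySem.List.pyGetD ids k 0 + 1)).foldl (fun cur n => cur + PySem.List.pyGetD cnts n 0) 0]) []
  (ids.map fun id => PySem.List.pyGetD keys id 0, acc)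

-- ===== PORT B =====
def recover_cnts_alt (keys : List Int) (cnts : List Int) (ids : List Int) : List Int × List Int :=
  let pref := cnts.foldl (fun pref c => pref ++ [PySem.List.pyGetD pref (-1) 0 + c]) [0]
  let st := ids.foldl (fun (st : Int × List Int) i =>
      (i + 1, st.2 ++ [if st.1 ≤ i then PySem.List.pyGetD pref (i + 1) 0 - PySem.List.pyGetD pref st.1 0 else 0])) (0, [])
  (ids.map fun i => PySem.List.pyGetD keys i 0, st.2)

-- ===== PRECONDITION & SPEC =====
-- Pre_ excludes ids whose keys-lookup is out of range (A raises IndexError) and ids whose non-empty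
-- cnts-segment [prev, ids[k]] touches a negative index: there A's sums read cnts through Python's
-- negative-index wraparound (or raise), an accidental artefact of A's implementation that B's
-- prefix-sum difference does not reproduce.
def Pre_recover_cnts (keys : List Int) (cnts : List Int) (ids : List Int) : Prop :=
  ∀ k : Nat, k < ids.length →
    (-(keys.length : Int) ≤ ids.getD k 0 ∧ ids.getD k 0 < (keys.length : Int)) ∧
    ((if k = 0 then 0 else ids.getD (k - 1) 0 + 1) ≤ ids.getD k 0 →
      0 ≤ (if k = 0 then (0 : Int) else ids.getD (k - 1) 0 + 1) ∧ ids.getD k 0 < (cnts.length : Int))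
instance (keys : List Int) (cnts : List Int) (ids : List Int) : Decidable (Pre_recover_cnts keys cnts ids) := by unfold Pre_recover_cnts; infer_instance
def pvWitness_recover_cnts : List Int × List Int × List Int := ([10, 20, 30], [1, 2, 3], [0, 2])
def Spec_recover_cnts (keys : List Int) (cnts : List Int) (ids : List Int) (out : List Int × List Int) : Prop := out = recover_cnts_alt keys cnts ids
instance (keys : List Int) (cnts : List Int) (ids : List Int) (out : List Int × List Int) : Decidable (Spec_recover_cnts keys cnts ids out) := by unfold Spec_recover_cnts; infer_instance

-- ===== CLAIM (what is proved, stated in full; the proofs are below) =====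
def Claim_equal_recover_cnts : Prop := ∀ (keys : List Int) (cnts : List Int) (ids : List Int), Dom_recover_cnts keys cnts ids → Pre_recover_cnts keys cnts ids → Spec_recover_cnts keys cnts ids (recover_cnts keys cnts ids)

-- ===== LEMMAS AND PROOFS =====

-- running partial sums starting from s
def psums (s : Int) : List Int → List Int
  | [] => []
  | c :: t => (s + c) :: psums (s + c) t

theorem psums_eq_map (cs : List Int) : ∀ s : Int,
    psums s cs = (List.range cs.length).map (fun j => s + (cs.take (j + 1)).sum) := by
  induction cs with
  | nil => intro s; rfl
  | cons c t ih =>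
      intro s
      simp only [psums, ih (s + c), List.length_cons, List.range_succ_eq_map, List.map_cons,
        List.map_map]
      refine List.cons_eq_cons.mpr ⟨by simp, ?_⟩
      apply List.map_congr_left
      intro j _
      simp [List.take_succ_cons, add_assoc]

theorem pref_fold (cs : List Int) : ∀ (l : List Int) (s : Int),
    cs.foldl (fun p c => p ++ [PySem.List.pyGetD p (-1) 0 + c]) (l ++ [s])
      = (l ++ [s]) ++ psums s cs := by
  induction cs with
  | nil => intro l s; simp [psums]
  | cons c t ih =>
      intro l s
      have hlast : PySem.List.pyGetD (l ++ [s]) (-1) 0 = s := by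
        simp [PySem.List.pyGetD, PySem.List.pyGet?, PySem.List.pyIdx?]
      simp only [List.foldl_cons, hlast]
      have := ih (l ++ [s]) (s + c)
      simp only [List.append_assoc] at this ⊢
      simpa [psums] using this

theorem pref_eq (cnts : List Int) :
    cnts.foldl (fun p c => p ++ [PySem.List.pyGetD p (-1) 0 + c]) [0]
      = (List.range (cnts.length + 1)).map (fun j => (cnts.take j).sum) := by
  have h := pref_fold cnts [] 0
  simp only [List.nil_append] at h
  rw [h, List.range_succ_eq_map, List.map_cons, List.map_map, psums_eq_map]
  simp

theorem pref_get (cnts : List Int) (j : Nat) (hj : j ≤ cnts.length) :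
    PySem.List.pyGetD (cnts.foldl (fun p c => p ++ [PySem.List.pyGetD p (-1) 0 + c]) [0]) (j : Int) 0
      = (cnts.take j).sum := by
  rw [pref_eq, PySem.List.pyGetD_natCast, PySem.List.getD_map_range _ _ _ _ (by omega)]

theorem pyRange_self_nil (a b : Int) (h : b ≤ a) : PySem.List.pyRange a b = [] := by
  simp [PySem.List.pyRange]
  omega

theorem seg_sum (cnts : List Int) (a b : Nat) (hab : a ≤ b) (hb : b ≤ cnts.length) :
    ((PySem.List.pyRange (a : Int) (b : Int)).map (fun n => PySem.List.pyGetD cnts n 0)).sum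
      = (cnts.take b).sum - (cnts.take a).sum := by
  induction b, hab using Nat.le_induction with
  | base => rw [pyRange_self_nil _ _ le_rfl]; simp
  | succ b hab ih =>
      rw [PySem.List.pyRange_one_append (a : Int) (b : Int) (b + 1 : Nat) (by exact_mod_cast hab) (by push_cast; omega),
        PySem.List.pyRange_one_cons (a := (b : Int)) (by push_cast; omega)]
      rw [pyRange_self_nil ((b : Int) + 1) ((b + 1 : Nat) : Int) (by push_cast; omega)]
      have hblt : b < cnts.length := by omega
      rw [List.map_append, List.sum_append, ih (by omega)]
      simp only [List.map_cons, List.map_nil, List.sum_cons, List.sum_nil]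
      rw [PySem.List.pyGetD_natCast, List.getD_eq_getElem _ _ hblt,
        List.sum_take_succ _ _ hblt]
      ring

-- B's per-id values with running previous boundary
def bspec (pref : List Int) : Int → List Int → List Int
  | _, [] => []
  | prev, i :: t =>
      (if prev ≤ i then PySem.List.pyGetD pref (i + 1) 0 - PySem.List.pyGetD pref prev 0 else 0)
        :: bspec pref (i + 1) t

theorem b_fold (pref : List Int) (ids : List Int) : ∀ (prev : Int) (acc : List Int),
    (ids.foldl (fun (st : Int × List Int) i =>
        (i + 1, st.2 ++ [if st.1 ≤ i then PySem.List.pyGetD pref (i + 1) 0 - PySem.List.pyGetD pref st.1 0 else 0]))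
      (prev, acc)).2 = acc ++ bspec pref prev ids := by
  induction ids with
  | nil => intro prev acc; simp [bspec]
  | cons i t ih =>
      intro prev acc
      simp only [List.foldl_cons, ih, bspec]
      simp

theorem bspec_length (pref : List Int) (ids : List Int) : ∀ prev : Int,
    (bspec pref prev ids).length = ids.length := by
  induction ids with
  | nil => intro _; rfl
  | cons i t ih => intro prev; simp [bspec, ih]

theorem bspec_get (pref : List Int) (ids : List Int) : ∀ (prev : Int) (k : Nat), k < ids.length →
    (bspec pref prev ids)[k]? = some (
      if (if k = 0 then prev else ids.getD (k - 1) 0 + 1) ≤ ids.getD k 0 then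
        PySem.List.pyGetD pref (ids.getD k 0 + 1) 0
          - PySem.List.pyGetD pref (if k = 0 then prev else ids.getD (k - 1) 0 + 1) 0
      else 0) := by
  induction ids with
  | nil => intro _ k hk; simp at hk
  | cons i t ih =>
      intro prev k hk
      cases k with
      | zero => simp [bspec]
      | succ k =>
          have hk' : k < t.length := by simpa using hk
          simp only [bspec, List.getElem?_cons_succ, ih (i + 1) k hk']
          cases k with
          | zero => simp
          | succ k => simp

-- the guarded prefix difference equals A's inner loop sum
theorem elt_eq (cnts : List Int) (start i : Int)
    (hcond : start ≤ i → 0 ≤ start ∧ i < (cnts.length : Int)) :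
    ((PySem.List.pyRange start (i + 1)).map (fun n => PySem.List.pyGetD cnts n 0)).sum
      = if start ≤ i then
          PySem.List.pyGetD (cnts.foldl (fun p c => p ++ [PySem.List.pyGetD p (-1) 0 + c]) [0]) (i + 1) 0
            - PySem.List.pyGetD (cnts.foldl (fun p c => p ++ [PySem.List.pyGetD p (-1) 0 + c]) [0]) start 0
        else 0 := by
  by_cases h : start ≤ i
  · obtain ⟨h0, hi⟩ := hcond h
    have hi0 : 0 ≤ i := le_trans h0 h
    rw [if_pos h]
    have ha : start = ((start.toNat : Nat) : Int) := by omega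
    have hb : i + 1 = ((i.toNat + 1 : Nat) : Int) := by omega
    rw [ha, hb, seg_sum cnts start.toNat (i.toNat + 1) (by omega) (by omega),
      pref_get cnts (i.toNat + 1) (by omega), pref_get cnts start.toNat (by omega)]
  · rw [if_neg h, pyRange_self_nil start (i + 1) (by omega)]
    simp

-- ===== VERDICT (by name: the statement is the Claim_ definition above) =====
theorem recover_cnts_spec : Claim_equal_recover_cnts := by
  intro keys cnts ids _ hpre
  unfold Spec_recover_cnts recover_cnts recover_cnts_alt
  simp only []
  refine Prod.ext rfl ?_
  rw [PySem.List.foldl_append_singleton_eq_map, List.nil_append, b_fold, List.nil_append]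
  apply List.ext_getElem?
  intro k
  by_cases hk : k < ids.length
  · rw [PySem.List.getElem?_map_pyRange_zero _ _ _ hk, bspec_get _ _ _ _ hk]
    have hcond := (hpre k hk).2
    have hstart : (if (k : Int) = 0 then 0 else PySem.List.pyGetD ids ((k : Int) - 1) 0 + 1)
        = (if k = 0 then (0 : Int) else ids.getD (k - 1) 0 + 1) := by
      cases k with
      | zero => simp
      | succ k =>
          simp [PySem.List.pyGetD_natCast]
          intro habs
          exfalso
          omega
    rw [PySem.List.foldl_add, PySem.List.pyGetD_natCast, hstart, zero_add,
      elt_eq cnts _ _ hcond]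
  · rw [List.getElem?_eq_none, List.getElem?_eq_none]
    · rw [bspec_length]; omega
    · rw [List.length_map]
      have : (PySem.List.pyRange 0 ((ids.length : Nat) : Int)).length = ids.length := by
        rw [PySem.List.pyRange_zero_natCast, List.length_map, List.length_range]
      omega
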